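-- pv_equiv track=rewrite | github.com/Jaiashar/vora-business-finder | berkeley_health_scraper.py | is_admin_email
-- ===== SOURCE A (Python) =====
-- def is_admin_email(email):
--     """Filter out department/admin/generic emails."""
--     admin_patterns = [
--         'info@', 'admin@', 'office@', 'dept@', 'webmaster@', 'help@',
--         'support@', 'contact@', 'registrar@', 'grad@', 'gradoffice@',
--         'department@', 'chair@', 'advising@', 'undergrad@', 'dean@',
--         'reception@', 'main@', 'general@', 'staff@', 'gradadmit@',
--         'calendar@', 'events@', 'news@', 'newsletter@', 'web@',
--         'marketing@', 'media@', 'communications@', 'hr@', 'hiring@',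
--         'jobs@', 'career@', 'alumni@', 'development@', 'giving@',
--         'feedback@', 'safety@', 'security@', 'facilities@', 'it@',
--         'tech@', 'helpdesk@', 'library@', 'gradapp@', 'apply@',
--         'ugrad@', 'econ@', 'polisci@', 'bef@', 'physics@', 'chem@',
--         'sph@', 'publichealth@', 'anthro@', 'anthdesk@', 'philosophy@',
--         'philos@', 'french@', 'german@', 'slavic@', 'ealc@',
--         'scandinavian@', 'sseas@', 'neareastern@', 'spanish@',
--         'demography@', 'geography@', 'italian@', 'iastp@',
--         'noreply@', 'no-reply@', 'donotreply@', 'do-not-reply@',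
--         'postmaster@', 'root@', 'abuse@', 'spam@', 'mailer@',
--         'www@', 'ftp@', 'sysadmin@',
--     ]
--     email_lower = email.lower()
--     return any(email_lower.startswith(p) for p in admin_patterns)
-- ===== SOURCE B (Python) =====
-- ADMIN_SET = frozenset(
--     "info admin office dept webmaster help support contact registrar grad "
--     "gradoffice department chair advising undergrad dean reception main "
--     "general staff gradadmit calendar events news newsletter web marketing "
--     "media communications hr hiring jobs career alumni development giving "
--     "feedback safety security facilities it tech helpdesk library gradapp "
--     "apply ugrad econ polisci bef physics chem sph publichealth anthro "
--     "anthdesk philosophy philos french german slavic ealc scandinavian "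
--     "sseas neareastern spanish demography geography italian iastp noreply "
--     "no-reply donotreply do-not-reply postmaster root abuse spam mailer "
--     "www ftp sysadmin".split()
-- )
--
-- def is_admin_email(email):
--     """Filter out department/admin/generic emails."""
--     local, sep, _ = email.lower().partition('@')
--     return sep == '@' and local in ADMIN_SET
-- ===== Notes on version B (the rewrite author's own statement) =====
-- stated objective: idiomatic
-- what changed: Instead of scanning 78 at-terminated prefix patterns with startswith, B keeps the bare local-parts in one whitespace-separated string, splits it once into a frozenset at module load, extracts the local-part with partition and does a single set-membership test.
import Mathlib
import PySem

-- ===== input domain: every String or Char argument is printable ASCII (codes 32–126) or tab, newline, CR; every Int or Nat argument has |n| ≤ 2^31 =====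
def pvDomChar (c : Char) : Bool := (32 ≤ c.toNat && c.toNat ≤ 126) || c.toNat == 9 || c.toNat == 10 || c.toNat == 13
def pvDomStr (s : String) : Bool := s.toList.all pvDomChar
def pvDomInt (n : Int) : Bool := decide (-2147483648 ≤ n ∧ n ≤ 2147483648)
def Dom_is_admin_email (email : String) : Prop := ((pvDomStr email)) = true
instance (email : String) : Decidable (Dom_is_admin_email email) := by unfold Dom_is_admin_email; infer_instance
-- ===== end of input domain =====

-- B keeps the bare local-parts in one whitespace-separated string, split once into a set, and tests the partitioned local-part for membership instead of scanning 78 startswith patterns (idiomatic).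


-- ===== PORT A =====
def adminPatterns : List String := [
  "info@", "admin@", "office@", "dept@", "webmaster@", "help@",
  "support@", "contact@", "registrar@", "grad@", "gradoffice@",
  "department@", "chair@", "advising@", "undergrad@", "dean@",
  "reception@", "main@", "general@", "staff@", "gradadmit@",
  "calendar@", "events@", "news@", "newsletter@", "web@",
  "marketing@", "media@", "communications@", "hr@", "hiring@",
  "jobs@", "career@", "alumni@", "development@", "giving@",
  "feedback@", "safety@", "security@", "facilities@", "it@",
  "tech@", "helpdesk@", "library@", "gradapp@", "apply@",
  "ugrad@", "econ@", "polisci@", "bef@", "physics@", "chem@",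
  "sph@", "publichealth@", "anthro@", "anthdesk@", "philosophy@",
  "philos@", "french@", "german@", "slavic@", "ealc@",
  "scandinavian@", "sseas@", "neareastern@", "spanish@",
  "demography@", "geography@", "italian@", "iastp@",
  "noreply@", "no-reply@", "donotreply@", "do-not-reply@",
  "postmaster@", "root@", "abuse@", "spam@", "mailer@",
  "www@", "ftp@", "sysadmin@"]

def is_admin_email (email : String) : Bool :=
  let email_lower := PySem.Str.lower email
  adminPatterns.any (fun p => PySem.Str.startswith email_lower p)

-- ===== PORT B =====
-- the module-level constant: one whitespace-separated string .split() into words, made a set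
def adminSet : PySem.Set String := PySem.Set.ofList (PySem.Str.split₀ (
  "info admin office dept webmaster help support contact registrar grad " ++
  "gradoffice department chair advising undergrad dean reception main " ++
  "general staff gradadmit calendar events news newsletter web marketing " ++
  "media communications hr hiring jobs career alumni development giving " ++
  "feedback safety security facilities it tech helpdesk library gradapp " ++
  "apply ugrad econ polisci bef physics chem sph publichealth anthro " ++
  "anthdesk philosophy philos french german slavic ealc scandinavian " ++
  "sseas neareastern spanish demography geography italian iastp noreply " ++
  "no-reply donotreply do-not-reply postmaster root abuse spam mailer " ++
  "www ftp sysadmin"))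

-- partition('@') ported by hand (exact for a 1-char separator: local = chars before the
-- first '@'; sep == '@' holds iff '@' occurs in the string).
def is_admin_email_alt (email : String) : Bool :=
  let l := (PySem.Str.lower email).toList
  let localPart : String := String.ofList (l.takeWhile (fun c => c != '@'))
  l.contains '@' && PySem.Set.contains adminSet localPart

-- ===== PRECONDITION & SPEC =====
def Spec_is_admin_email (email : String) (out : Bool) : Prop := out = is_admin_email_alt email
instance (email : String) (out : Bool) : Decidable (Spec_is_admin_email email out) := by unfold Spec_is_admin_email; infer_instance

-- ===== CLAIM (what is proved, stated in full; the proofs are below) =====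
def Claim_equal_is_admin_email : Prop := ∀ (email : String), Dom_is_admin_email email → Spec_is_admin_email email (is_admin_email email)

-- ===== LEMMAS AND PROOFS =====
set_option maxRecDepth 8000
set_option maxHeartbeats 2000000

-- A pattern "w@" is a prefix of s iff s contains '@' and the part of s before the first '@' is w.
theorem prefix_at_iff (w s : List Char) (hw : '@' ∉ w) :
    (w ++ ['@']) <+: s ↔ ('@' ∈ s ∧ s.takeWhile (fun c => c != '@') = w) := by
  induction w generalizing s with
  | nil =>
    cases s with
    | nil => simp
    | cons b t =>
      by_cases hb : b = '@'
      · subst hb; simp [List.cons_prefix_cons]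
      · simp [List.cons_prefix_cons, hb, (Ne.symm hb : ¬ '@' = b)]
  | cons a w ih =>
    have ha : a ≠ '@' := fun h => hw (h ▸ List.mem_cons_self)
    cases s with
    | nil => simp
    | cons b t =>
      by_cases hb : b = '@'
      · subst hb
        constructor
        · rintro h
          rw [List.cons_append, List.cons_prefix_cons] at h
          exact absurd h.1 ha
        · rintro ⟨_, h⟩
          simp at h
      · rw [List.cons_append, List.cons_prefix_cons,
          ih t (fun h => hw (List.mem_cons_of_mem _ h))]
        constructor
        · rintro ⟨rfl, h1, h2⟩
          refine ⟨List.mem_cons_of_mem _ h1, ?_⟩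
          simpa [List.takeWhile_cons, hb] using h2
        · rintro ⟨h1, h2⟩
          simp [hb] at h2
          rcases h2 with ⟨rfl, h2⟩
          rcases List.mem_cons.1 h1 with h | h
          · exact absurd h.symm hb
          · exact ⟨rfl, h, h2⟩

theorem no_at_takeWhile (l : List Char) : '@' ∉ l.takeWhile (fun c => c != '@') := by
  intro h
  have := List.mem_takeWhile_imp h
  simp at this

theorem adminSet_eq : adminSet = PySem.Set.ofList ["info", "admin", "office", "dept", "webmaster", "help", "support", "contact", "registrar", "grad", "gradoffice", "department", "chair", "advising", "undergrad", "dean", "reception", "main", "general", "staff", "gradadmit", "calendar", "events", "news", "newsletter", "web", "marketing", "media", "communications", "hr", "hiring", "jobs", "career", "alumni", "development", "giving", "feedback", "safety", "security", "facilities", "it", "tech", "helpdesk", "library", "gradapp", "apply", "ugrad", "econ", "polisci", "bef", "physics", "chem", "sph", "publichealth", "anthro", "anthdesk", "philosophy", "philos", "french", "german", "slavic", "ealc", "scandinavian", "sseas", "neareastern", "spanish", "demography", "geography", "italian", "iastp", "noreply", "no-reply", "donotreply", "do-not-reply", "postmaster", "root", "abuse", "spam", "mailer", "www", "ftp", "sysadmin"]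 := by decide

theorem patterns_chars :
    adminPatterns.map String.toList = adminSet.map (fun w => w.toList ++ ['@']) := by rw [adminSet_eq]; decide

theorem adminSet_no_at : ∀ w ∈ adminSet, '@' ∉ w.toList := by rw [adminSet_eq]; decide

theorem is_admin_email_eq (email : String) :
    is_admin_email email = is_admin_email_alt email := by
  unfold is_admin_email is_admin_email_alt
  set l := (PySem.Str.lower email).toList with hl
  rw [Bool.eq_iff_iff]
  simp only [List.any_eq_true, PySem.Str.startswith_eq, Bool.and_eq_true,
    PySem.Set.contains, List.contains_eq_mem, decide_eq_true_eq]
  constructor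
  · rintro ⟨p, hp, hpre⟩
    rw [PySem.Chars.startswith_iff] at hpre
    have hmem : p.toList ∈ adminSet.map (fun w => w.toList ++ ['@']) := by
      rw [← patterns_chars]; exact List.mem_map_of_mem hp
    rcases List.mem_map.1 hmem with ⟨w, hw, heq⟩
    rw [← heq] at hpre
    rcases (prefix_at_iff w.toList l (adminSet_no_at w hw)).1 hpre with ⟨hat, htake⟩
    refine ⟨hat, ?_⟩
    rw [htake, String.ofList_toList]
    exact hw
  · rintro ⟨hat, hcon⟩
    have hpre : (l.takeWhile (fun c => c != '@') ++ ['@']) <+: l :=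
      (prefix_at_iff _ l (no_at_takeWhile l)).2 ⟨hat, rfl⟩
    have hmem : l.takeWhile (fun c => c != '@') ++ ['@'] ∈ adminPatterns.map String.toList := by
      rw [patterns_chars]
      have := List.mem_map_of_mem (f := fun w => w.toList ++ ['@']) hcon
      simpa [String.toList_ofList] using this
    rcases List.mem_map.1 hmem with ⟨p, hp, hpl⟩
    refine ⟨p, hp, ?_⟩
    rw [PySem.Chars.startswith_iff, hpl]
    exact hpre

-- ===== VERDICT (by name: the statement is the Claim_ definition above) =====
theorem is_admin_email_spec : Claim_equal_is_admin_email := by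
  intro email _
  unfold Spec_is_admin_email
  exact is_admin_email_eq email
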